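-- pv_equiv track=rewrite | github.com/Androkotey/gb_scraping | Homeworks/HW2/superjob.py | pseudo_space_handling
-- ===== SOURCE A (Python) =====
-- def pseudo_space_handling(raw_salary):
--     pseudo_space_indexes = []
--     for i, letters in enumerate(zip(raw_salary[:-2], raw_salary[1:-1], raw_salary[2:])):
--         x, y, z = letters
--         if y == ' ' and x.isdigit() and z.isdigit():
--             pseudo_space_indexes.append(i)
--     temp = list(raw_salary)
--     for ind in pseudo_space_indexes:
--         temp[ind + 1] = '.'
--     raw_salary = ''.join(temp).replace('.', '')
--     return raw_salary
-- ===== SOURCE B (Python) =====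
-- def pseudo_space_handling(raw_salary):
--     n = len(raw_salary)
--     out = []
--     for j, c in enumerate(raw_salary):
--         if c == '.':
--             continue
--         if c == ' ' and 0 < j < n - 1 and raw_salary[j - 1].isdigit() and raw_salary[j + 1].isdigit():
--             continue
--         out.append(c)
--     return ''.join(out)
-- ===== Notes on version B (the rewrite author's own statement) =====
-- stated objective: simpler
-- what changed: Replaces A's three-pass structure (collect pseudo-space indices from zipped slices, overwrite them with a '.' sentinel in a char list, then globally strip all dots) with one left-to-right filtering pass that skips every '.' and every space flanked by digits.
import Mathlib
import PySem

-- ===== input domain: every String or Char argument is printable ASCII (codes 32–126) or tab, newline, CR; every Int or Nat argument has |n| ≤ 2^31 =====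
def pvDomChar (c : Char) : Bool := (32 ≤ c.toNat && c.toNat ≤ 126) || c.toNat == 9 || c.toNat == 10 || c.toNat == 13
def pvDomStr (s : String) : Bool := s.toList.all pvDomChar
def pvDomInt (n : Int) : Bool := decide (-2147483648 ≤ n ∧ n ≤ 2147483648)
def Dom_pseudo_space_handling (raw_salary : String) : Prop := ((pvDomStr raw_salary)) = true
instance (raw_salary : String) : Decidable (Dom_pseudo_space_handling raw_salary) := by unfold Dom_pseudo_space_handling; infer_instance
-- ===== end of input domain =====

-- B replaces A's three passes (collect indices, overwrite with a '.' sentinel, strip all dots) by one filtering pass; objective: simpler.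


-- ===== PORT A =====
def pseudo_space_handling (raw_salary : String) : String :=
  let s := raw_salary.toList
  -- for i, letters in enumerate(zip(raw_salary[:-2], raw_salary[1:-1], raw_salary[2:]))
  let triples := (PySem.List.slice s none (some (-2))).zip
      ((PySem.List.slice s (some 1) (some (-1))).zip (PySem.List.slice s (some 2) none))
  let pseudo_space_indexes :=
    (PySem.List.enumerate triples).foldl
      (fun acc p =>
        if p.2.2.1 = ' ' ∧ PySem.Chars.isdigit p.2.1 ∧ PySem.Chars.isdigit p.2.2.2 then
          acc ++ [p.1]
        else acc) []
  -- temp = list(raw_salary); temp[ind+1] = '.' for each collected index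
  let temp := pseudo_space_indexes.foldl (fun t ind => PySem.List.pySetD t (ind + 1) '.') s
  -- ''.join(temp).replace('.', '')
  String.ofList (PySem.Chars.replace temp ['.'] [])

-- ===== PORT B =====
def pseudo_space_handling_alt (raw_salary : String) : String :=
  let s := raw_salary.toList
  let n := s.length
  let out :=
    (PySem.List.enumerate s).foldl
      (fun acc p =>
        if p.2 = '.' then acc
        else if p.2 = ' ' ∧ 0 < p.1 ∧ p.1 < (n : Int) - 1 ∧
            PySem.Chars.isdigit (PySem.List.pyGetD s (p.1 - 1) ' ') ∧
            PySem.Chars.isdigit (PySem.List.pyGetD s (p.1 + 1) ' ') then acc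
        else acc ++ [p.2]) []
  String.ofList out

-- ===== PRECONDITION & SPEC =====
def Spec_pseudo_space_handling (raw_salary : String) (out : String) : Prop := out = pseudo_space_handling_alt raw_salary
instance (raw_salary : String) (out : String) : Decidable (Spec_pseudo_space_handling raw_salary out) := by unfold Spec_pseudo_space_handling; infer_instance

-- ===== CLAIM (what is proved, stated in full; the proofs are below) =====
def Claim_equal_pseudo_space_handling : Prop := ∀ (raw_salary : String), Dom_pseudo_space_handling raw_salary → Spec_pseudo_space_handling raw_salary (pseudo_space_handling raw_salary)

-- ===== LEMMAS AND PROOFS =====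

-- a pseudo space: a ' ' at position j flanked by digits, strictly inside the string
def pvMark (s : List Char) (j : Nat) : Bool :=
  (decide (1 ≤ j) && decide (j + 1 < s.length)) && (s.getD j ' ' == ' ')
    && PySem.Chars.isdigit (s.getD (j - 1) ' ') && PySem.Chars.isdigit (s.getD (j + 1) ' ')

-- the common closed form both ports are reduced to
def pvCF (s : List Char) : List Char :=
  ((List.range s.length).filter
      (fun j => !(s.getD j ' ' == '.') && !pvMark s j)).map (fun j => s.getD j ' ')

theorem pv_go (fuel : Nat) : ∀ (l acc : List Char), l.length ≤ fuel →
    PySem.Chars.replace.go ['.'] [] fuel l acc = acc.reverse ++ l.filter (· ≠ '.') := by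
  induction fuel with
  | zero => intro l acc h; rw [List.length_eq_zero_iff.mp (Nat.le_zero.mp h)]; rfl
  | succ f ih =>
    intro l acc h
    cases l with
    | nil => rw [PySem.Chars.replace.go] <;> simp
    | cons c t =>
      rw [PySem.Chars.replace.go]
      by_cases hc : c = '.'
      · subst hc
        simp only [List.isPrefixOf, BEq.rfl, Bool.and_self, if_true]
        rw [ih _ _ (by simpa using Nat.le_of_succ_le_succ h)]
        simp
      · have : (['.'].isPrefixOf (c :: t)) = false := by
          simp only [List.isPrefixOf, Bool.and_true, beq_eq_false_iff_ne]
          exact fun h => hc h.symm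
        rw [this]
        simp only [Bool.false_eq_true, if_false]
        rw [ih _ _ (by simpa using Nat.le_of_succ_le_succ h)]
        simp [hc]

theorem pv_replace_filter (l : List Char) :
    PySem.Chars.replace l ['.'] [] = l.filter (· ≠ '.') := by
  rw [PySem.Chars.replace]
  simp only [List.isEmpty_cons, Bool.false_eq_true, if_false]
  simpa using pv_go l.length l [] le_rfl

theorem pv_foldl_set_getD (L : List Int) (hL : ∀ e ∈ L, 0 ≤ e) (t : List Char) (m : Nat) (d : Char) :
    (L.foldl (fun t ind => PySem.List.pySetD t (ind + 1) '.') t).getD m d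
      = if ((m : Int) ∈ L.map (· + 1) ∧ m < t.length) then '.' else t.getD m d := by
  induction L generalizing t with
  | nil => simp
  | cons e tl ih =>
    obtain ⟨k, hk⟩ : ∃ k : Nat, e = (k : Int) :=
      ⟨e.toNat, (Int.toNat_of_nonneg (hL e (by simp))).symm⟩
    subst hk
    have he1 : (k : Int) + 1 = ((k + 1 : Nat) : Int) := by push_cast; ring
    rw [List.foldl_cons, he1, PySem.List.pySetD_natCast,
      ih (fun e he => hL e (by simp [he]))]
    have hlen : (t.set (k+1) '.').length = t.length := by simp
    rw [hlen]
    by_cases hmem : (m : Int) ∈ tl.map (· + 1)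
    · by_cases hlt : m < t.length
      · simp [hmem, hlt]
      · simp [hmem, hlt]
    · -- value comes from the set
      have hget : (t.set (k+1) '.').getD m d = if k + 1 = m ∧ m < t.length then '.' else t.getD m d := by
        simp only [List.getD, List.getElem?_set]
        by_cases h1 : k + 1 = m
        · subst h1; by_cases h2 : k + 1 < t.length <;> simp [h2]
        · simp [h1]
      rw [hget]
      by_cases h1 : k + 1 = m
      · subst h1
        by_cases h2 : k + 1 < t.length
        · simp [h2]
        · simp [h2]
      · have : ¬ ((m : Int) = (k : Int) + 1) := by omega
        simp [hmem, h1, this, List.getD]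

theorem pv_foldl_set_length (L : List Int) (t : List Char) :
    (L.foldl (fun t ind => PySem.List.pySetD t (ind + 1) '.') t).length = t.length := by
  induction L generalizing t with
  | nil => rfl
  | cons e tl ih => simp [List.foldl_cons, ih, PySem.List.length_pySetD]

theorem pv_slice_mid (s : List Char) :
    PySem.List.slice s (some 1) (some (-1)) = (s.drop 1).take (s.length - 2) := by
  rcases s with _ | ⟨c, t⟩
  · rfl
  · simp [PySem.List.slice, PySem.List.clampIdx]
    rw [if_neg (by omega)]
    omega

theorem pv_trip_get (s : List Char) (k : Nat) (h : k < s.length - 2) :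
    ((s.take (s.length-2)).zip (((s.drop 1).take (s.length - 2)).zip (s.drop 2)))[k]'(by
      simp [List.length_zip, List.length_take, List.length_drop]; omega)
      = (s[k]'(by omega), (s[k+1]'(by omega), s[k+2]'(by omega))) := by
  have h1 : 1 + k = k + 1 := by omega
  have h2 : 2 + k = k + 2 := by omega
  simp [List.getElem_zip, List.getElem_take, List.getElem_drop, h2]

-- a foldl that skips on two conditions is a filter
theorem pv_foldl_skip2 {α β : Type} (A B : α → Prop) [DecidablePred A] [DecidablePred B]
    (f : α → β) (l : List α) (acc : List β) :
    l.foldl (fun acc x => if A x then acc else if B x then acc else acc ++ [f x]) acc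
      = acc ++ (l.filter (fun x => decide (¬ A x ∧ ¬ B x))).map f := by
  have hbody : (fun (acc : List β) x => if A x then acc else if B x then acc else acc ++ [f x])
      = fun acc x => if (¬ A x ∧ ¬ B x) then acc ++ [f x] else acc := by
    funext acc x
    by_cases hA : A x <;> by_cases hB : B x <;> simp [hA, hB]
  rw [hbody, PySem.List.foldl_append_ite]

theorem pv_enum_eq (s : List Char) :
    PySem.List.enumerate s 0 = (List.range s.length).map (fun j : Nat => ((j : Int), s.getD j ' ')) := by
  apply List.ext_getElem?
  intro k
  rw [PySem.List.getElem?_enumerate]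
  by_cases hk : k < s.length
  · rw [List.getElem?_eq_getElem hk, List.getElem?_map, List.getElem?_range hk]
    simp [List.getD, List.getElem?_eq_getElem hk]
  · rw [List.getElem?_eq_none (by omega), List.getElem?_eq_none (by simpa using by omega)]
    rfl

theorem pv_A_eq (raw_salary : String) :
    (pseudo_space_handling raw_salary).toList = pvCF raw_salary.toList := by
  unfold pseudo_space_handling
  set s := raw_salary.toList with hs
  simp only [String.toList_ofList, pv_slice_mid, PySem.List.slice_to_neg_ofNat s 2 (by norm_num),
    PySem.List.slice_from s (a := 2) (by norm_num)]
  rw [PySem.List.foldl_append_ite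
    (p := fun p : Int × (Char × Char × Char) => p.2.2.1 = ' ' ∧ PySem.Chars.isdigit p.2.1 ∧ PySem.Chars.isdigit p.2.2.2)
    (f := Prod.fst)]
  rw [List.nil_append, pv_replace_filter,
    show List.drop (Int.toNat 2) s = List.drop 2 s from rfl]
  set n := s.length with hn
  set triples := (s.take (n-2)).zip (((s.drop 1).take (n - 2)).zip (s.drop 2)) with htrip
  set idxs := List.map Prod.fst (List.filter
    (fun p : Int × (Char × Char × Char) =>
      decide (p.2.2.1 = ' ' ∧ PySem.Chars.isdigit p.2.1 = true ∧ PySem.Chars.isdigit p.2.2.2 = true))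
    (PySem.List.enumerate triples 0)) with hidxs
  have hgetD : ∀ (m : Nat) (h : m < n), s.getD m ' ' = s[m] := by
    intro m h; simp [List.getD, List.getElem?_eq_getElem h]
  have htriplen : triples.length = n - 2 := by
    simp [htrip, List.length_zip, List.length_take, List.length_drop]
    omega
  have htget : ∀ (k : Nat) (hk : k < triples.length),
      triples[k] = (s[k]'(by omega), (s[k+1]'(by omega), s[k+2]'(by omega))) := by
    intro k hk
    have hk2 : k < n - 2 := by omega
    have h1 : triples[k]? = some (s[k]'(by omega), (s[k+1]'(by omega), s[k+2]'(by omega))) := by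
      rw [htrip, List.getElem?_eq_getElem (by simp [List.length_zip]; omega), pv_trip_get s k hk2]
    have h2 : triples[k]? = some triples[k] := List.getElem?_eq_getElem hk
    rw [h1] at h2
    exact (Option.some_inj.mp h2).symm
  have hidx_mem : ∀ e : Int, e ∈ idxs ↔ ∃ k : Nat, k < n - 2 ∧ e = (k : Int) ∧
      (s.getD (k+1) ' ' = ' ' ∧ PySem.Chars.isdigit (s.getD k ' ') ∧
        PySem.Chars.isdigit (s.getD (k+2) ' ')) := by
    intro e
    rw [hidxs]
    simp only [List.mem_map, List.mem_filter, PySem.List.mem_enumerate_iff, decide_eq_true_eq]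
    constructor
    · rintro ⟨p, ⟨⟨k, hk, rfl⟩, hcp⟩, rfl⟩
      rw [htriplen] at hk
      rw [htget k (by omega)] at hcp
      refine ⟨k, hk, by push_cast; ring, ?_, ?_, ?_⟩
      · rw [hgetD (k+1) (by omega)]; exact hcp.1
      · rw [hgetD k (by omega)]; exact hcp.2.1
      · rw [hgetD (k+2) (by omega)]; exact hcp.2.2
    · rintro ⟨k, hk, rfl, h3, h4, h5⟩
      refine ⟨((0 : Int) + (k : Nat), triples[k]'(by omega)), ⟨⟨k, by omega, rfl⟩, ?_⟩, by push_cast; ring⟩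
      rw [htget k (by omega)]
      refine ⟨?_, ?_, ?_⟩
      · rw [← hgetD (k+1) (by omega)]; exact h3
      · rw [← hgetD k (by omega)]; exact h4
      · rw [← hgetD (k+2) (by omega)]; exact h5
  have hL : ∀ e ∈ idxs, 0 ≤ e := by
    intro e he
    obtain ⟨k, _, rfl, _⟩ := (hidx_mem e).mp he
    positivity
  have hmm : ∀ m : Nat, ((m : Int) ∈ idxs.map (· + 1)) ↔ pvMark s m = true := by
    intro m
    simp only [List.mem_map]
    constructor
    · rintro ⟨e, he, heq⟩
      obtain ⟨k, hk, rfl, h3, h4, h5⟩ := (hidx_mem e).mp he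
      have hm : m = k + 1 := by omega
      subst hm
      simp only [pvMark, Bool.and_eq_true, decide_eq_true_eq, beq_iff_eq]
      refine ⟨⟨⟨⟨by omega, by omega⟩, h3⟩, by simpa using h4⟩, ?_⟩
      have : k + 1 + 1 = k + 2 := by omega
      rw [this]; exact h5
    · intro hm
      simp only [pvMark, Bool.and_eq_true, decide_eq_true_eq, beq_iff_eq] at hm
      obtain ⟨⟨⟨⟨h1, h2⟩, h3⟩, h4⟩, h5⟩ := hm
      refine ⟨((m - 1 : Nat) : Int), (hidx_mem _).mpr ⟨m - 1, by omega, rfl, ?_, ?_, ?_⟩, by omega⟩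
      · have h : m - 1 + 1 = m := by omega
        rw [h]; exact h3
      · exact h4
      · have h : m - 1 + 2 = m + 1 := by omega
        rw [h]; exact h5
  have hlen : (idxs.foldl (fun t ind => PySem.List.pySetD t (ind + 1) '.') s).length = n :=
    pv_foldl_set_length idxs s
  have htemp : idxs.foldl (fun t ind => PySem.List.pySetD t (ind + 1) '.') s
      = (List.range n).map (fun j => if pvMark s j then '.' else s.getD j ' ') := by
    apply List.ext_getElem?
    intro i
    by_cases hi : i < n
    · rw [List.getElem?_eq_getElem (by rw [hlen]; exact hi), List.getElem?_map, List.getElem?_range hi]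
      have hgd : (idxs.foldl (fun t ind => PySem.List.pySetD t (ind + 1) '.') s)[i]'(by rw [hlen]; exact hi)
          = (idxs.foldl (fun t ind => PySem.List.pySetD t (ind + 1) '.') s).getD i ' ' := by
        simp [List.getD, List.getElem?_eq_getElem (show i < _ by rw [hlen]; exact hi)]
      rw [hgd, pv_foldl_set_getD idxs hL s i ' ']
      simp only [Option.map_some]
      by_cases hpm : pvMark s i = true
      · rw [if_pos ⟨(hmm i).mpr hpm, by omega⟩, if_pos hpm]
      · rw [if_neg (by rw [hmm i]; tauto), if_neg hpm]
    · rw [List.getElem?_eq_none (by rw [hlen]; omega), List.getElem?_eq_none (by simp; omega)]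
  rw [htemp, List.filter_map]
  unfold pvCF
  rw [List.filter_congr (q := fun j => !(s.getD j ' ' == '.') && !pvMark s j) ?_]
  · apply List.map_congr_left
    intro j hj
    rw [List.mem_filter] at hj
    have : pvMark s j = false := by
      rcases hj with ⟨-, hq⟩
      simp only [Bool.and_eq_true, Bool.not_eq_true'] at hq
      exact hq.2
    simp [this]
  · intro j hj
    simp only [Function.comp]
    by_cases hpm : pvMark s j = true
    · simp [hpm]
    · simp only [Bool.not_eq_true] at hpm
      simp [hpm]
      rw [Bool.eq_iff_iff]
      simp [beq_iff_eq]

theorem pv_B_eq (raw_salary : String) :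
    (pseudo_space_handling_alt raw_salary).toList = pvCF raw_salary.toList := by
  unfold pseudo_space_handling_alt
  set s := raw_salary.toList with hs
  simp only [String.toList_ofList]
  rw [pv_foldl_skip2 (A := fun p : Int × Char => p.2 = '.')
    (B := fun p : Int × Char => p.2 = ' ' ∧ 0 < p.1 ∧ p.1 < (s.length : Int) - 1 ∧
      PySem.Chars.isdigit (PySem.List.pyGetD s (p.1 - 1) ' ') ∧
      PySem.Chars.isdigit (PySem.List.pyGetD s (p.1 + 1) ' ')) (f := Prod.snd)]
  rw [List.nil_append, pv_enum_eq, List.filter_map, List.map_map]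
  unfold pvCF
  have hmap : (Prod.snd ∘ fun j : Nat => ((j : Int), s.getD j ' ')) = fun j : Nat => s.getD j ' ' := rfl
  rw [hmap]
  congr 1
  apply List.filter_congr
  intro j hj
  rw [List.mem_range] at hj
  simp only [Function.comp]
  rw [Bool.eq_iff_iff]
  simp only [decide_eq_true_eq, Bool.and_eq_true, Bool.not_eq_true', beq_eq_false_iff_ne]
  constructor
  · rintro ⟨hdot, hB⟩
    refine ⟨hdot, ?_⟩
    rw [Bool.eq_false_iff]
    intro hm
    apply hB
    simp only [pvMark, Bool.and_eq_true, decide_eq_true_eq, beq_iff_eq] at hm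
    obtain ⟨⟨⟨⟨h1, h2⟩, h3⟩, h4⟩, h5⟩ := hm
    refine ⟨h3, by omega, by omega, ?_, ?_⟩
    · have : (j : Int) - 1 = ((j - 1 : Nat) : Int) := by omega
      rw [this, PySem.List.pyGetD_natCast]; exact h4
    · have : (j : Int) + 1 = ((j + 1 : Nat) : Int) := by omega
      rw [this, PySem.List.pyGetD_natCast]; exact h5
  · rintro ⟨hdot, hm⟩
    refine ⟨hdot, ?_⟩
    rintro ⟨h3, h0, hlt, d1, d2⟩
    rw [Bool.eq_false_iff] at hm
    apply hm
    simp only [pvMark, Bool.and_eq_true, decide_eq_true_eq, beq_iff_eq]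
    refine ⟨⟨⟨⟨by omega, by omega⟩, h3⟩, ?_⟩, ?_⟩
    · have : (j : Int) - 1 = ((j - 1 : Nat) : Int) := by omega
      rw [this, PySem.List.pyGetD_natCast] at d1; exact d1
    · have : (j : Int) + 1 = ((j + 1 : Nat) : Int) := by omega
      rw [this, PySem.List.pyGetD_natCast] at d2; exact d2

-- ===== VERDICT (by name: the statement is the Claim_ definition above) =====
theorem pseudo_space_handling_spec : Claim_equal_pseudo_space_handling := by
  intro raw_salary _
  unfold Spec_pseudo_space_handling
  exact String.toList_inj.mp ((pv_A_eq raw_salary).trans (pv_B_eq raw_salary).symm)
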